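-- pv_equiv track=rewrite | github.com/SeanDictionary/Samples | samples.py | rational_to_contfrac
-- ===== SOURCE A (Python) =====
-- def rational_to_contfrac(x: int, y: int):
--     """
--     有理数x/y分解为连分数\\
--     [a0, ..., an]
--     """
--     a = x // y
--     pquotients = [a]
--     while a * y != x:
--         x, y = y, x - a * y
--         a = x // y
--         pquotients.append(a)
--     return pquotients
-- ===== SOURCE B (Python) =====
-- def rational_to_contfrac(x: int, y: int):
--     """
--     有理数x/y分解为连分数\\
--     [a0, ..., an]
--     """
--     a = x // y
--     r = x - a * y
--     if r == 0:
--         return [a]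
--     return [a] + rational_to_contfrac(y, r)
-- ===== Notes on version B (the rewrite author's own statement) =====
-- stated objective: idiomatic
-- what changed: Replaced the imperative while-loop that mutates (x, y, a) and appends to a list with a direct recursion over the Euclidean descent that mirrors the continued-fraction definition, building the list front-to-back by consing.
import Mathlib
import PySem

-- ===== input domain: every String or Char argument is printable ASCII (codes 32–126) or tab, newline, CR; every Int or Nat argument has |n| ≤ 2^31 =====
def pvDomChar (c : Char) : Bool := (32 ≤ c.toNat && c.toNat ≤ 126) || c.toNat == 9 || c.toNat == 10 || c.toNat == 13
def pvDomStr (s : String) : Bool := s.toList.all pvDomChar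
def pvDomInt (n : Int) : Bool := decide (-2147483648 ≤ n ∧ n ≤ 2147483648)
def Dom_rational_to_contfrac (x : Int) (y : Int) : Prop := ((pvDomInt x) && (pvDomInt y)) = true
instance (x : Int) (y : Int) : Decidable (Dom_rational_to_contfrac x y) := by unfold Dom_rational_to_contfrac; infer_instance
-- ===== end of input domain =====

-- B replaces A's imperative while-loop (mutating (x, y, a) and appending) with a direct
-- recursion over the Euclidean descent, consing each quotient in front; same cost (objective: idiomatic).

-- the Euclidean remainder strictly shrinks in absolute value (used for termination of both ports)
theorem pv_rem_lt (x y : Int) (hy : y ≠ 0) :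
    (x - PySem.Int.floordiv x y * y).natAbs < y.natAbs := by
  have h := PySem.Int.floordiv_mul_add_mod x y
  rcases lt_or_gt_of_ne hy with h0 | h0
  · have hb := PySem.Int.mod_neg_bounds x h0
    omega
  · have h1 := PySem.Int.mod_nonneg x h0
    have h2 := PySem.Int.mod_lt x h0
    omega

-- ===== PORT A =====
-- A's while-loop as structural recursion over the loop state (x, y, pquotients); the
-- quotient 'a' of the current state is recomputed at the loop head (it is x // y throughout).
-- The 'y = 0' guard only makes the recursion total; Pre_ excludes y = 0 (Python raises there).
def rational_to_contfrac_loop (x y : Int) (pquotients : List Int) : List Int :=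
  if hy : y = 0 then pquotients
  else
    let a := PySem.Int.floordiv x y
    if a * y = x then pquotients
    else
      let y' := x - a * y
      rational_to_contfrac_loop y y' (pquotients ++ [PySem.Int.floordiv y y'])
termination_by y.natAbs
decreasing_by exact pv_rem_lt x y hy

def rational_to_contfrac (x : Int) (y : Int) : List Int :=
  rational_to_contfrac_loop x y [PySem.Int.floordiv x y]

-- ===== PORT B =====
def rational_to_contfrac_alt (x : Int) (y : Int) : List Int :=
  if hy : y = 0 then [PySem.Int.floordiv x y]   -- totality guard only; Python raises, Pre_ excludes y = 0
  else
    let a := PySem.Int.floordiv x y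
    let r := x - a * y
    if r = 0 then [a]
    else a :: rational_to_contfrac_alt y r
termination_by y.natAbs
decreasing_by exact pv_rem_lt x y hy

-- ===== PRECONDITION & SPEC =====
-- Pre_ excludes exactly y = 0, where the Python A raises ZeroDivisionError (as does B).
def Pre_rational_to_contfrac (x : Int) (y : Int) : Prop := y ≠ 0
instance (x : Int) (y : Int) : Decidable (Pre_rational_to_contfrac x y) := by unfold Pre_rational_to_contfrac; infer_instance
def pvWitness_rational_to_contfrac : Int × Int := (355, 113)

def Spec_rational_to_contfrac (x : Int) (y : Int) (out : List Int) : Prop := out = rational_to_contfrac_alt x y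
instance (x : Int) (y : Int) (out : List Int) : Decidable (Spec_rational_to_contfrac x y out) := by unfold Spec_rational_to_contfrac; infer_instance

-- ===== CLAIM (what is proved, stated in full; the proofs are below) =====
def Claim_equal_rational_to_contfrac : Prop := ∀ (x : Int) (y : Int), Dom_rational_to_contfrac x y → Pre_rational_to_contfrac x y → Spec_rational_to_contfrac x y (rational_to_contfrac x y)

-- ===== LEMMAS AND PROOFS =====

-- loop invariant: with the current quotient already appended, the loop produces acc ++ (B's tail)
theorem loop_eq_alt : ∀ (n : ℕ) (x y : Int), y.natAbs ≤ n → y ≠ 0 → ∀ (acc : List Int),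
    rational_to_contfrac_loop x y (acc ++ [PySem.Int.floordiv x y]) = acc ++ rational_to_contfrac_alt x y := by
  intro n
  induction n with
  | zero => intro x y hle hy; omega
  | succ n ih =>
    intro x y hle hy acc
    rw [rational_to_contfrac_loop, rational_to_contfrac_alt]
    simp only [hy, dite_false]
    by_cases h : PySem.Int.floordiv x y * y = x
    · simp [h]
    · have hr : x - PySem.Int.floordiv x y * y ≠ 0 := fun hc => h (by omega)
      have hlt := pv_rem_lt x y hy
      simp only [hr, if_neg h]
      have := ih y (x - PySem.Int.floordiv x y * y) (by omega) hr (acc ++ [PySem.Int.floordiv x y])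
      simpa using this

-- ===== VERDICT (by name: the statement is the Claim_ definition above) =====
theorem rational_to_contfrac_spec : Claim_equal_rational_to_contfrac := by
  intro x y _ hy
  show rational_to_contfrac x y = rational_to_contfrac_alt x y
  have := loop_eq_alt y.natAbs x y le_rfl hy []
  simpa [rational_to_contfrac] using this
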